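/- GENERATED by farm/mkstatement.py from design/units.split.tsv — do not edit.
   THE SPLIT of the proof unit `start_decoder.R7` into `start_decoder.R7a`, `start_decoder.R7b`, `start_decoder.R7c`: the children's statements give the parent's
   UNCHANGED statement (so nothing above the parent — callers, compositions — is touched by the split). -/
import Vorbis.Spec.StartDecoderR7
import Vorbis.Spec.Units.start_decoder_R7
import Vorbis.Spec.Units.start_decoder_R7a
import Vorbis.Spec.Units.start_decoder_R7b
import Vorbis.Spec.Units.start_decoder_R7c
namespace Vorbis.Spec.Splits
open X86 X86.User Asan

/-- The children of the split unit `start_decoder.R7` prove it, by `Vorbis.Spec.StartDecoder.SegR7.of_parts`. -/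
theorem start_decoder_R7
    (h_start_decoder_R7a : Vorbis.Spec.start_decoder_R7a.Statement)
    (h_start_decoder_R7b : Vorbis.Spec.start_decoder_R7b.Statement)
    (h_start_decoder_R7c : Vorbis.Spec.start_decoder_R7c.Statement) :
    Vorbis.Spec.start_decoder_R7.Statement := by
  intro Lay _hLay μ _hμ u₀ _hcode _h_asan_load8_noabort _h_asan_load1_noabort _h_asan_load4_noabort _h_setup_malloc _h_asan_store8_noabort _h_error _h_asan_store1_noabort
  apply Vorbis.Spec.StartDecoder.SegR7.of_parts
  · exact h_start_decoder_R7a Lay _hLay μ _hμ u₀ _hcode _h_asan_load8_noabort _h_asan_load1_noabort _h_asan_load4_noabort _h_setup_malloc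
  · exact h_start_decoder_R7b Lay _hLay μ _hμ u₀ _hcode _h_asan_load8_noabort _h_asan_store8_noabort _h_error
  · exact h_start_decoder_R7c Lay _hLay μ _hμ u₀ _hcode _h_asan_load8_noabort _h_asan_load1_noabort _h_asan_store1_noabort

end Vorbis.Spec.Splits
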